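-- pv_equiv track=rewrite | github.com/JulietteRietzler/CScodingweeks24team2 | MVP2/validité_nom.py | nb_occurrences
-- ===== SOURCE A (Python) =====
-- def nb_occurrences(liste):
--     """
--      Renvoie un dictionnaire avec les éléments d'une liste en keys et leur nombre d'occurrences en values
--     :param liste
--     :return: dictionnaire
--     """
--     occurrences = {}
--     for word in liste :
--        if word in occurrences:
--            occurrences[word] += 1
--        else:
--            occurrences[word] = 1
--     return occurrences
-- ===== SOURCE B (Python) =====
-- def nb_occurrences(liste):
--     """
--      Renvoie un dictionnaire avec les éléments d'une liste en keys et leur nombre d'occurrences en values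
--     :param liste
--     :return: dictionnaire
--     """
--     return {word: liste.count(word) for word in dict.fromkeys(liste)}
-- ===== Notes on version B (the rewrite author's own statement) =====
-- stated objective: alternative
-- what changed: Replaces the single accumulating counting pass with a two-stage computation: first deduplicate to the distinct elements in first-occurrence order (dict.fromkeys), then rescan the list with liste.count for each distinct element.
import Mathlib
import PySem

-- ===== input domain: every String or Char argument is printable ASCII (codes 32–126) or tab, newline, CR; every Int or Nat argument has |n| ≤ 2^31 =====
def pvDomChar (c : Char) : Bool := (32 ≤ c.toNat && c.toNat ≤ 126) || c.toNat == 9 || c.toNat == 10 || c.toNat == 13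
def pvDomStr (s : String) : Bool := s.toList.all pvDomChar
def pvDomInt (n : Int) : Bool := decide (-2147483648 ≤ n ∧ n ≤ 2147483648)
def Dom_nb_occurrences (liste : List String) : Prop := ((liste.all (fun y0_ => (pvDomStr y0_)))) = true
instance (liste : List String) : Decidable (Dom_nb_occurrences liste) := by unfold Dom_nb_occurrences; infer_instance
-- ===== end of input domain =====

-- B replaces A's single accumulating counting pass with a two-stage build: dedup to distinct
-- elements in first-occurrence order, then rescan with liste.count (alternative decomposition, no speed claim).


-- ===== PORT A =====
-- A: one pass; 'occurrences[word] += 1' is d.insert word (d[word] + 1); getD is exact since the key is present.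
def nb_occurrences (liste : List String) : List (String × Int) :=
  (liste.foldl (fun occurrences word =>
      if occurrences.contains word then occurrences.insert word (occurrences.getD word 0 + 1)
      else occurrences.insert word 1)
    PySem.Dict.empty).items

-- ===== PORT B =====
-- B: dict.fromkeys dedup, then liste.count per distinct word.
def nb_occurrences_alt (liste : List String) : List (String × Int) :=
  (PySem.List.dedup liste).map (fun word => (word, (liste.count word : Int)))

-- ===== PRECONDITION & SPEC =====
def Spec_nb_occurrences (liste : List String) (out : List (String × Int)) : Prop := out = nb_occurrences_alt liste
instance (liste : List String) (out : List (String × Int)) : Decidable (Spec_nb_occurrences liste out) := by unfold Spec_nb_occurrences; infer_instance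

-- ===== CLAIM (what is proved, stated in full; the proofs are below) =====
def Claim_equal_nb_occurrences : Prop := ∀ (liste : List String), Dom_nb_occurrences liste → Spec_nb_occurrences liste (nb_occurrences liste)

-- ===== LEMMAS AND PROOFS =====
theorem step_eq (d : PySem.Dict String Int) (w : String) :
    (if d.contains w then d.insert w (d.getD w 0 + 1) else d.insert w 1)
      = d.insert w (d.getD w 0 + 1) := by
  by_cases h : d.contains w = true
  · simp [h]
  · have h0 : d.getD w 0 = 0 :=
      PySem.Dict.getD_of_not_contains d (0 : Int) (by simpa using h)
    simp [h, h0]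

-- ===== VERDICT (by name: the statement is the Claim_ definition above) =====
theorem nb_occurrences_spec : Claim_equal_nb_occurrences := by
  intro liste _
  unfold Spec_nb_occurrences nb_occurrences nb_occurrences_alt
  have hf : (fun (d : PySem.Dict String Int) w =>
      if d.contains w then d.insert w (d.getD w 0 + 1) else d.insert w 1)
      = fun d w => d.insert w (d.getD w 0 + 1) := by
    funext d w; exact step_eq d w
  rw [hf, PySem.Dict.foldl_insert_getD_add_one_eq_counter, PySem.Dict.items_counter,
    PySem.List.dedup_eq_ofList]
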